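-- pv_equiv track=rewrite | github.com/adislice/Ldrive | utils.py | create_pages
-- ===== SOURCE A (Python) =====
-- def create_pages(li):
--     nais = {}
--     page = []
--     temp = []
--     dict_idx = 0
--     for i, val in enumerate(li):
--         temp.append(val)
--         if len(temp) > 3:
--             page.append(temp)
--             temp = []
--         if len(page) > 3:
--             dict_idx += 1
--             nais[dict_idx] = page
--             page = []
--         if i == len(li)-1:
--             dict_idx += 1
--             page.append(temp)
--             nais[dict_idx] = page
--             break
--     return nais
-- ===== SOURCE B (Python) =====
-- def create_pages(li):
--     # Slice-based: build all size-4 chunks plus the always-present remainder chunk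
--     # (possibly empty), then group the chunks four to a page by index arithmetic.
--     n = len(li)
--     if n == 0:
--         return {}
--     k = n // 4
--     chunks = [li[4 * j:4 * j + 4] for j in range(k)]
--     chunks.append(li[4 * k:])
--     return {j + 1: chunks[4 * j:4 * j + 4] for j in range((len(chunks) + 3) // 4)}
-- ===== Notes on version B (the rewrite author's own statement) =====
-- stated objective: alternative
-- what changed: Replaces A's single element-by-element state machine (temp/page/dict accumulators with flush conditions and a last-element break) by direct slice arithmetic: all n//4 size-4 chunks plus the always-present remainder chunk are built by slicing, then grouped four-to-a-page by index arithmetic in a dict comprehension.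
import Mathlib
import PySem

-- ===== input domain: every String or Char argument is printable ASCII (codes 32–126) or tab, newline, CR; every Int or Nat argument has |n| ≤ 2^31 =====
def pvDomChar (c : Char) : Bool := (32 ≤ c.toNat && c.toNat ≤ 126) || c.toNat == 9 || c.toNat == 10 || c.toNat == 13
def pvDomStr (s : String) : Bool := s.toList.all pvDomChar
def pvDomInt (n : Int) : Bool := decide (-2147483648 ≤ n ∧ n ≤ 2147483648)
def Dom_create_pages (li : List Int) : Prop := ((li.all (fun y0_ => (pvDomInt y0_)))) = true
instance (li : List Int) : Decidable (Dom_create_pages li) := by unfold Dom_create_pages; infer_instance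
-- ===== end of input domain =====

-- B re-chunks by slice arithmetic instead of A's element-by-element state machine (alternative decomposition; same asymptotic cost).

-- ===== PORT A =====
-- literal transliteration of A's loop; the dict 'nais' is a PySem.Dict, the loop is
-- structural recursion over the list carrying the enumerate index i and len(li) = n.
mutual
-- one iteration: 'temp.append(val); if len(temp) > 3: …' then the rest of the body
def create_pages_go (rest : List Int) (i n : Nat)
    (nais : PySem.Dict Int (List (List Int))) (page : List (List Int))
    (temp : List Int) (dict_idx : Int) : PySem.Dict Int (List (List Int)) :=
  match rest with
  | [] => nais
  | val :: rest' =>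
    let temp := temp ++ [val]
    if temp.length > 3 then create_pages_go2 rest' i n nais (page ++ [temp]) [] dict_idx
    else create_pages_go2 rest' i n nais page temp dict_idx
termination_by (rest.length, 0)

-- 'if len(page) > 3: …' block
def create_pages_go2 (rest' : List Int) (i n : Nat)
    (nais : PySem.Dict Int (List (List Int))) (page : List (List Int))
    (temp : List Int) (dict_idx : Int) : PySem.Dict Int (List (List Int)) :=
  if page.length > 3 then
    create_pages_go3 rest' i n (nais.insert (dict_idx + 1) page) [] temp (dict_idx + 1)
  else create_pages_go3 rest' i n nais page temp dict_idx
termination_by (rest'.length, 2)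

-- 'if i == len(li)-1: …' block (the break), else the next iteration
def create_pages_go3 (rest' : List Int) (i n : Nat)
    (nais : PySem.Dict Int (List (List Int))) (page : List (List Int))
    (temp : List Int) (dict_idx : Int) : PySem.Dict Int (List (List Int)) :=
  if i = n - 1 then nais.insert (dict_idx + 1) (page ++ [temp])
  else create_pages_go rest' (i + 1) n nais page temp dict_idx
termination_by (rest'.length, 1)
end

def create_pages (li : List Int) : List (Int × List (List Int)) :=
  (create_pages_go li 0 li.length PySem.Dict.empty [] [] 0).items

-- ===== PORT B =====
-- literal transliteration of Source B: k = n // 4 full slices plus the remainder slice,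
-- then the dict comprehension over range((len(chunks)+3)//4); its keys j+1 are distinct
-- and fresh, so the dict it builds IS this association list in insertion order.
def create_pages_alt (li : List Int) : List (Int × List (List Int)) :=
  let n : Int := li.length
  if n = 0 then []
  else
    let k : Int := PySem.Int.floordiv n 4
    let chunks : List (List Int) :=
      ((PySem.List.pyRange 0 k 1).map
        (fun j => PySem.List.slice li (some (4 * j)) (some (4 * j + 4))))
      ++ [PySem.List.slice li (some (4 * k)) none]
    (PySem.List.pyRange 0 (PySem.Int.floordiv ((chunks.length : Int) + 3) 4) 1).map
      (fun j => (j + 1, PySem.List.slice chunks (some (4 * j)) (some (4 * j + 4))))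

-- ===== PRECONDITION & SPEC =====
def Spec_create_pages (li : List Int) (out : List (Int × List (List Int))) : Prop := out = create_pages_alt li
instance (li : List Int) (out : List (Int × List (List Int))) : Decidable (Spec_create_pages li out) := by unfold Spec_create_pages; infer_instance

-- ===== CLAIM (what is proved, stated in full; the proofs are below) =====
def Claim_equal_create_pages : Prop := ∀ (li : List Int), Dom_create_pages li → Spec_create_pages li (create_pages li)

-- ===== LEMMAS AND PROOFS =====

-- proof-side clean forms
def chunksSpec (li : List Int) : List (List Int) :=
  if li.length < 4 then [li] else li.take 4 :: chunksSpec (li.drop 4)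
termination_by li.length
decreasing_by simp [List.length_drop]; omega

def pagesSpec0 (cs : List (List Int)) (idx : Int) : List (Int × List (List Int)) :=
  if cs.length ≤ 4 then [(idx + 1, cs)]
  else (idx + 1, cs.take 4) :: pagesSpec0 (cs.drop 4) (idx + 1)
termination_by cs.length
decreasing_by simp [List.length_drop]; omega

def pagesSpecP (page cs : List (List Int)) (idx : Int) : List (Int × List (List Int)) :=
  if page.length + cs.length ≤ 4 then [(idx + 1, page ++ cs)]
  else (idx + 1, page ++ cs.take (4 - page.length)) :: pagesSpec0 (cs.drop (4 - page.length)) (idx + 1)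

-- goA: A's loop with the dict as a plain append-list and the last-element test as rest' = []
mutual
def goA (rest : List Int) (nais : List (Int × List (List Int))) (page : List (List Int))
    (temp : List Int) (idx : Int) : List (Int × List (List Int)) :=
  match rest with
  | [] => nais
  | val :: rest' =>
    let temp := temp ++ [val]
    if temp.length > 3 then goA2 rest' nais (page ++ [temp]) [] idx
    else goA2 rest' nais page temp idx
termination_by (rest.length, 0)

def goA2 (rest' : List Int) (nais : List (Int × List (List Int))) (page : List (List Int))
    (temp : List Int) (idx : Int) : List (Int × List (List Int)) :=
  if page.length > 3 then goA3 rest' (nais ++ [(idx + 1, page)]) [] temp (idx + 1)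
  else goA3 rest' nais page temp idx
termination_by (rest'.length, 2)

def goA3 (rest' : List Int) (nais : List (Int × List (List Int))) (page : List (List Int))
    (temp : List Int) (idx : Int) : List (Int × List (List Int)) :=
  if rest' = [] then nais ++ [(idx + 1, page ++ [temp])]
  else goA rest' nais page temp idx
termination_by (rest'.length, 1)
end

lemma dict_fresh_contains (d : PySem.Dict Int (List (List Int))) (k : Int)
    (hlt : ∀ kk ∈ d.keys, kk < k) : d.contains k = false := by
  cases hcd : d.contains k with
  | false => rfl
  | true => exact absurd (hlt k ((PySem.Dict.contains_iff_mem_keys d k).mp hcd)) (lt_irrefl k)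

lemma pagesSpecP_nil (cs : List (List Int)) (idx : Int) :
    pagesSpecP [] cs idx = pagesSpec0 cs idx := by
  rw [pagesSpecP]
  conv_rhs => rw [pagesSpec0]
  norm_num

lemma pagesSpecP_small (page cs : List (List Int)) (idx : Int)
    (h : page.length + cs.length ≤ 4) : pagesSpecP page cs idx = [(idx + 1, page ++ cs)] := by
  rw [pagesSpecP, if_pos h]

lemma pagesSpecP_full (page : List (List Int)) (c0 : List Int) (cs : List (List Int)) (idx : Int)
    (h3 : page.length = 3) (hne : cs ≠ []) :
    pagesSpecP page (c0 :: cs) idx = (idx + 1, page ++ [c0]) :: pagesSpec0 cs (idx + 1) := by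
  have hlen : 0 < cs.length := List.length_pos_of_ne_nil hne
  rw [pagesSpecP, if_neg (by simp [h3]; omega), h3]
  simp

lemma pagesSpecP_absorb (page : List (List Int)) (c0 : List Int) (cs : List (List Int)) (idx : Int)
    (h : page.length < 3) :
    pagesSpecP page (c0 :: cs) idx = pagesSpecP (page ++ [c0]) cs idx := by
  rw [pagesSpecP, pagesSpecP]
  have hlen : (page ++ [c0]).length = page.length + 1 := by simp
  have hl1 : (c0 :: cs).length = cs.length + 1 := by simp
  by_cases hc : page.length + cs.length + 1 ≤ 4
  · rw [if_pos (by simp only [hl1]; omega), if_pos (by simp only [hlen]; omega)]; simp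
  · rw [if_neg (by simp only [hl1]; omega), if_neg (by simp only [hlen]; omega)]
    have h4 : 4 - page.length = (3 - page.length) + 1 := by omega
    have h4' : 4 - (page ++ [c0]).length = 3 - page.length := by rw [hlen]; omega
    rw [h4, h4']
    simp

lemma chunksSpec_ne_nil (li : List Int) : chunksSpec li ≠ [] := by
  rw [chunksSpec]; split <;> simp

lemma chunksSpec_small (li : List Int) (h : li.length < 4) : chunksSpec li = [li] := by
  rw [chunksSpec, if_pos h]

lemma chunksSpec_ge (li : List Int) (h : ¬ li.length < 4) :
    chunksSpec li = li.take 4 :: chunksSpec (li.drop 4) := by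
  rw [chunksSpec, if_neg h]

lemma create_pages_go3_eq (rest' : List Int) (i n : Nat)
    (nais : PySem.Dict Int (List (List Int))) (page : List (List Int)) (temp : List Int) (idx : Int)
    (hn : i + rest'.length + 1 = n) (hk : ∀ kk ∈ nais.keys, kk < idx + 1)
    (IH : ∀ (nais : PySem.Dict Int (List (List Int))) (page : List (List Int)) (temp : List Int) (idx : Int),
      (∀ kk ∈ nais.keys, kk < idx + 1) →
      (create_pages_go rest' (i + 1) n nais page temp idx).items = goA rest' nais.items page temp idx) :
    (create_pages_go3 rest' i n nais page temp idx).items = goA3 rest' nais.items page temp idx := by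
  rw [create_pages_go3, goA3]
  have hiff : (i = n - 1) ↔ (rest' = []) := by rw [← List.length_eq_zero_iff]; omega
  by_cases h3 : rest' = []
  · rw [if_pos (hiff.mpr h3), if_pos h3]
    exact PySem.Dict.items_insert_of_not_contains nais _ (dict_fresh_contains nais _ hk)
  · rw [if_neg (fun hh => h3 (hiff.mp hh)), if_neg h3]
    exact IH nais page temp idx hk

lemma create_pages_go2_eq (rest' : List Int) (i n : Nat)
    (nais : PySem.Dict Int (List (List Int))) (page : List (List Int)) (temp : List Int) (idx : Int)
    (hn : i + rest'.length + 1 = n) (hk : ∀ kk ∈ nais.keys, kk < idx + 1)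
    (IH : ∀ (nais : PySem.Dict Int (List (List Int))) (page : List (List Int)) (temp : List Int) (idx : Int),
      (∀ kk ∈ nais.keys, kk < idx + 1) →
      (create_pages_go rest' (i + 1) n nais page temp idx).items = goA rest' nais.items page temp idx) :
    (create_pages_go2 rest' i n nais page temp idx).items = goA2 rest' nais.items page temp idx := by
  rw [create_pages_go2, goA2]
  have hk' : ∀ kk ∈ (nais.insert (idx + 1) page).keys, kk < idx + 1 + 1 := by
    intro kk hkk
    rcases (PySem.Dict.mem_keys_insert nais _ kk page).mp hkk with h | h
    · omega
    · have := hk kk h; omega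
  by_cases h2 : page.length > 3
  · rw [if_pos h2, if_pos h2,
      ← PySem.Dict.items_insert_of_not_contains nais page (dict_fresh_contains nais _ hk)]
    exact create_pages_go3_eq rest' i n _ _ _ _ hn hk' IH
  · rw [if_neg h2, if_neg h2]
    exact create_pages_go3_eq rest' i n _ _ _ _ hn hk IH

lemma create_pages_go_eq_goA (rest : List Int) : ∀ (i n : Nat)
    (nais : PySem.Dict Int (List (List Int))) (page : List (List Int)) (temp : List Int) (idx : Int),
    i + rest.length = n → (∀ kk ∈ nais.keys, kk < idx + 1) →
    (create_pages_go rest i n nais page temp idx).items = goA rest nais.items page temp idx := by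
  induction rest with
  | nil => intro i n nais page temp idx _ _; rw [create_pages_go, goA]
  | cons val rest' ih =>
    intro i n nais page temp idx hn hk
    simp only [List.length_cons] at hn
    have hn' : i + rest'.length + 1 = n := by omega
    have IH : ∀ (nais : PySem.Dict Int (List (List Int))) (page : List (List Int)) (temp : List Int) (idx : Int),
        (∀ kk ∈ nais.keys, kk < idx + 1) →
        (create_pages_go rest' (i + 1) n nais page temp idx).items = goA rest' nais.items page temp idx :=
      fun nais page temp idx hk => ih (i + 1) n nais page temp idx (by omega) hk
    rw [create_pages_go, goA]
    by_cases h1 : (temp ++ [val]).length > 3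
    · rw [if_pos h1, if_pos h1]
      exact create_pages_go2_eq rest' i n _ _ _ _ hn' hk IH
    · rw [if_neg h1, if_neg h1]
      exact create_pages_go2_eq rest' i n _ _ _ _ hn' hk IH

-- one-step unfoldings of goA from an empty temp
lemma goA_step1 (a : Int) (nais : List (Int × List (List Int))) (page : List (List Int)) (idx : Int)
    (hp : page.length ≤ 3) : goA [a] nais page [] idx = nais ++ [(idx + 1, page ++ [[a]])] := by
  simp [goA, goA2, goA3, show ¬ 3 < page.length by omega]

lemma goA_step2 (a b : Int) (nais : List (Int × List (List Int))) (page : List (List Int)) (idx : Int)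
    (hp : page.length ≤ 3) : goA [a, b] nais page [] idx = nais ++ [(idx + 1, page ++ [[a, b]])] := by
  simp [goA, goA2, goA3, show ¬ 3 < page.length by omega]

lemma goA_step3 (a b c : Int) (nais : List (Int × List (List Int))) (page : List (List Int)) (idx : Int)
    (hp : page.length ≤ 3) : goA [a, b, c] nais page [] idx = nais ++ [(idx + 1, page ++ [[a, b, c]])] := by
  simp [goA, goA2, goA3, show ¬ 3 < page.length by omega]

lemma goA_step4 (a b c d : Int) (nais : List (Int × List (List Int))) (page : List (List Int)) (idx : Int)
    (hp : page.length ≤ 3) :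
    goA [a, b, c, d] nais page [] idx =
      if page.length = 3 then nais ++ [(idx + 1, page ++ [[a, b, c, d]]), (idx + 2, [[]])]
      else nais ++ [(idx + 1, page ++ [[a, b, c, d], []])] := by
  by_cases h3 : page.length = 3
  · simp [goA, goA2, goA3, h3]; omega
  · simp [goA, goA2, goA3, show ¬ 3 < page.length by omega, h3, show ¬ 3 < page.length + 1 by omega]

lemma goA_step5 (a b c d : Int) (rest' : List Int) (nais : List (Int × List (List Int)))
    (page : List (List Int)) (idx : Int) (hp : page.length ≤ 3) (hne : rest' ≠ []) :
    goA (a :: b :: c :: d :: rest') nais page [] idx =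
      if page.length = 3 then goA rest' (nais ++ [(idx + 1, page ++ [[a, b, c, d]])]) [] [] (idx + 1)
      else goA rest' nais (page ++ [[a, b, c, d]]) [] idx := by
  by_cases h3 : page.length = 3
  · simp [goA, goA2, goA3, h3, hne]
  · simp [goA, goA2, goA3, show ¬ 3 < page.length by omega, h3, show ¬ 3 < page.length + 1 by omega, hne]

lemma goA_eq_pages (m : Nat) : ∀ (rest : List Int) (nais : List (Int × List (List Int)))
    (page : List (List Int)) (idx : Int), rest.length = m → rest ≠ [] → page.length ≤ 3 →
    goA rest nais page [] idx = nais ++ pagesSpecP page (chunksSpec rest) idx := by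
  induction m using Nat.strong_induction_on with
  | _ m ih =>
    intro rest nais page idx hm hne hp
    rcases rest with _ | ⟨a, _ | ⟨b, _ | ⟨c, _ | ⟨d, rest'⟩⟩⟩⟩
    · exact absurd rfl hne
    · rw [goA_step1 a nais page idx hp, chunksSpec_small _ (by simp),
        pagesSpecP_small _ _ _ (by simp; omega)]
    · rw [goA_step2 a b nais page idx hp, chunksSpec_small _ (by simp),
        pagesSpecP_small _ _ _ (by simp; omega)]
    · rw [goA_step3 a b c nais page idx hp, chunksSpec_small _ (by simp),
        pagesSpecP_small _ _ _ (by simp; omega)]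
    · have ht : List.take 4 (a :: b :: c :: d :: rest') = [a, b, c, d] := rfl
      have hd : List.drop 4 (a :: b :: c :: d :: rest') = rest' := rfl
      rcases rest' with _ | ⟨e, rest''⟩
      · rw [goA_step4 a b c d nais page idx hp, chunksSpec_ge _ (by simp), ht, hd,
          chunksSpec_small [] (by simp)]
        by_cases h3 : page.length = 3
        · rw [if_pos h3, pagesSpecP_full _ _ _ _ h3 (by simp), pagesSpec0, if_pos (by simp)]
          norm_num
          omega
        · rw [if_neg h3, pagesSpecP_small _ _ _ (by simp; omega)]
      · have hne' : e :: rest'' ≠ [] := by simp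
        rw [goA_step5 a b c d (e :: rest'') nais page idx hp hne',
          chunksSpec_ge _ (by simp), ht, hd]
        by_cases h3 : page.length = 3
        · rw [if_pos h3,
            ih (e :: rest'').length (by simp at hm ⊢; omega) (e :: rest'')
              (nais ++ [(idx + 1, page ++ [[a, b, c, d]])]) [] (idx + 1) rfl hne' (by simp),
            pagesSpecP_nil, pagesSpecP_full _ _ _ _ h3 (chunksSpec_ne_nil _)]
          simp
        · rw [if_neg h3,
            ih (e :: rest'').length (by simp at hm ⊢; omega) (e :: rest'')
              nais (page ++ [[a, b, c, d]]) idx rfl hne' (by simp; omega),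
            pagesSpecP_absorb _ _ _ _ (by omega)]

lemma chunksB_eq (m : Nat) : ∀ (li : List Int), li.length = m →
    ((List.range (li.length / 4)).map (fun j => (li.drop (4 * j)).take 4))
      ++ [li.drop (4 * (li.length / 4))] = chunksSpec li := by
  induction m using Nat.strong_induction_on with
  | _ m ih =>
    intro li hm
    by_cases h4 : li.length < 4
    · have : li.length / 4 = 0 := by omega
      rw [this, chunksSpec_small li h4]
      simp
    · have hk : li.length / 4 = (li.drop 4).length / 4 + 1 := by
        simp only [List.length_drop]; omega
      have hmap : List.map ((fun j => List.take 4 (List.drop (4 * j) li)) ∘ Nat.succ)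
            (List.range ((li.drop 4).length / 4))
          = List.map (fun j => List.take 4 (List.drop (4 * j) (li.drop 4)))
            (List.range ((li.drop 4).length / 4)) := by
        apply List.map_congr_left
        intro j _
        simp only [Function.comp_apply, List.drop_drop]
        congr 2
        omega
      have hlast : List.drop (4 * ((li.drop 4).length / 4 + 1)) li
          = List.drop (4 * ((li.drop 4).length / 4)) (li.drop 4) := by
        simp only [List.drop_drop]
        congr 1
        omega
      rw [chunksSpec_ge li h4, ← ih (li.drop 4).length (by simp; omega) (li.drop 4) rfl,
        hk, List.range_succ_eq_map, List.map_cons, List.map_map, hmap, hlast,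
        List.cons_append]
      congr 1

lemma group_eq (m : Nat) : ∀ (cs : List (List Int)) (idx : Int), cs.length = m → cs ≠ [] →
    (List.range ((cs.length + 3) / 4)).map
      (fun (j : Nat) => ((idx + (j : Int) + 1 : Int), (cs.drop (4 * j)).take 4)) = pagesSpec0 cs idx := by
  induction m using Nat.strong_induction_on with
  | _ m ih =>
    intro cs idx hm hne
    have hpos : 0 < cs.length := List.length_pos_of_ne_nil hne
    rw [pagesSpec0]
    by_cases h4 : cs.length ≤ 4
    · rw [if_pos h4, show (cs.length + 3) / 4 = 1 by omega]
      simp [List.range_one, List.take_of_length_le h4]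
    · rw [if_neg h4, show (cs.length + 3) / 4 = ((cs.drop 4).length + 3) / 4 + 1 by
        simp only [List.length_drop]; omega, List.range_succ_eq_map]
      simp only [List.map_cons, List.map_map]
      rw [← ih (cs.drop 4).length (by simp; omega) (cs.drop 4) (idx + 1) rfl
        (by simp; omega)]
      congr 1
      · norm_num
      apply List.map_congr_left
      intro j _
      simp only [Function.comp_apply, List.drop_drop, Prod.mk.injEq]
      refine ⟨by push_cast; ring, ?_⟩
      congr 2
      omega

lemma alt_eq_pages (li : List Int) (h : li ≠ []) :
    create_pages_alt li = pagesSpec0 (chunksSpec li) 0 := by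
  have hpos : 0 < li.length := List.length_pos_of_ne_nil h
  rw [create_pages_alt]
  simp only []
  rw [if_neg (by exact_mod_cast Nat.pos_iff_ne_zero.mp hpos)]
  have hfd : PySem.Int.floordiv (li.length : Int) 4 = ((li.length / 4 : Nat) : Int) := by
    exact_mod_cast PySem.Int.floordiv_natCast li.length 4
  rw [hfd]
  have hchunks :
      ((PySem.List.pyRange 0 ((li.length / 4 : Nat) : Int) 1).map
        (fun j => PySem.List.slice li (some (4 * j)) (some (4 * j + 4))))
      ++ [PySem.List.slice li (some (4 * ((li.length / 4 : Nat) : Int))) none] = chunksSpec li := by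
    rw [← chunksB_eq li.length li rfl]
    congr 1
    · rw [PySem.List.pyRange_zero_natCast, List.map_map]
      apply List.map_congr_left
      intro j _
      simp only [Function.comp_apply]
      rw [show (4 * (j : Int)) = ((4 * j : Nat) : Int) by push_cast; ring,
        show ((4 * j : Nat) : Int) + 4 = ((4 * j : Nat) : Int) + ((4 : Nat) : Int) by norm_num,
        PySem.List.slice_natCast_add]
    · rw [show (4 * ((li.length / 4 : Nat) : Int)) = ((4 * (li.length / 4) : Nat) : Int) by
        push_cast; ring, PySem.List.slice_from_natCast]
  rw [hchunks]
  have hlen : ((chunksSpec li).length : Int) + 3 = (((chunksSpec li).length + 3 : Nat) : Int) := by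
    push_cast; ring
  rw [hlen]
  have hfd2 : PySem.Int.floordiv ((((chunksSpec li).length + 3 : Nat)) : Int) 4
      = ((((chunksSpec li).length + 3) / 4 : Nat) : Int) := by
    exact_mod_cast PySem.Int.floordiv_natCast ((chunksSpec li).length + 3) 4
  rw [hfd2, PySem.List.pyRange_zero_natCast, List.map_map,
    ← group_eq (chunksSpec li).length (chunksSpec li) 0 rfl (chunksSpec_ne_nil li)]
  apply List.map_congr_left
  intro j _
  simp only [Function.comp_apply]
  rw [show (4 * (j : Int)) = ((4 * j : Nat) : Int) by push_cast; ring,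
    show ((4 * j : Nat) : Int) + 4 = ((4 * j : Nat) : Int) + ((4 : Nat) : Int) by norm_num,
    PySem.List.slice_natCast_add]
  norm_num

-- ===== VERDICT (by name: the statement is the Claim_ definition above) =====
theorem create_pages_spec : Claim_equal_create_pages := by
  intro li _
  show create_pages li = create_pages_alt li
  by_cases h : li = []
  · subst h
    show (create_pages_go [] 0 0 PySem.Dict.empty [] [] 0).items = create_pages_alt []
    rw [create_pages_go, create_pages_alt]
    rfl
  · rw [create_pages, create_pages_go_eq_goA li 0 li.length _ _ _ 0 (by simp) (by simp [PySem.Dict.empty]),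
      alt_eq_pages li h]
    rw [show (PySem.Dict.empty : PySem.Dict Int (List (List Int))).items = [] from rfl,
      goA_eq_pages li.length li [] [] 0 rfl h (by simp), pagesSpecP_nil]
    rfl
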